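-- pv_equiv track=rewrite | github.com/rajchinnag/CHC-Pro-Ai | backend/coding_engine.py | _mue_checks
-- ===== SOURCE A (Python) =====
-- from typing import Dict, List, Optional
--
-- def _mue_checks(procedures: List[dict]) -> List[str]:
--     """Medically Unlikely Edits — simplified: flag duplicates > 1."""
--     counts: Dict[str, int] = {}
--     for p in procedures:
--         counts[p["code"]] = counts.get(p["code"], 0) + 1
--     msgs: List[str] = []
--     for code, c in counts.items():
--         if c > 1:
--             msgs.append(f"MUE: CPT {code} reported {c}× — review MUE limit.")
--     if not msgs:
--         msgs.append("MUE edits: all procedure units within CMS MUE limits.")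
--     return msgs
-- ===== SOURCE B (Python) =====
-- def _mue_checks(procedures):
--     """Medically Unlikely Edits — simplified: flag duplicates > 1."""
--
--     def go(codes):
--         # Recurse on the distinct codes: take the first code, count it,
--         # then strip ALL its occurrences before recursing on the rest.
--         if not codes:
--             return []
--         head, rest = codes[0], codes[1:]
--         c = 1 + rest.count(head)
--         hit = [f"MUE: CPT {head} reported {c}\u00d7 — review MUE limit."] if c > 1 else []
--         return hit + go([x for x in rest if x != head])
--
--     msgs = go([p["code"] for p in procedures])
--     return msgs or ["MUE edits: all procedure units within CMS MUE limits."]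
-- ===== Notes on version B (the rewrite author's own statement) =====
-- stated objective: alternative
-- what changed: Replaces the counts-dict build-then-iterate with a recursive removal algorithm: take the first remaining code, count it, emit its message, strip all its occurrences from the list, and recurse on what is left (no dict and no dedup pass).
import Mathlib
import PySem

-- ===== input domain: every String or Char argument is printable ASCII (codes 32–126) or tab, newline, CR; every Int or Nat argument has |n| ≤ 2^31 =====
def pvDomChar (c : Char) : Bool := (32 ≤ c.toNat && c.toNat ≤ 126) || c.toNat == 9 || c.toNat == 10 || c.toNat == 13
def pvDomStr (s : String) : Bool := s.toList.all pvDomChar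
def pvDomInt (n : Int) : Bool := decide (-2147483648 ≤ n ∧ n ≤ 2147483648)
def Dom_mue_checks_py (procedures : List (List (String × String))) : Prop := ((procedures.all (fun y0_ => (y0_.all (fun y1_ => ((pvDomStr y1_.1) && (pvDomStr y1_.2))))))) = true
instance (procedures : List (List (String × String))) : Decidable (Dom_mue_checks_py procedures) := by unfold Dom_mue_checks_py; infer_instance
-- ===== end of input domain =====

-- B replaces the counts-dict build-then-iterate with a recursive removal algorithm
-- (count the first code, strip all its occurrences, recurse); same result, not faster.

-- shared helpers (both Pythons build the identical f-string and do the identical p["code"] lookup)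
def mueMsg (code : String) (c : Int) : String :=
  "MUE: CPT " ++ code ++ " reported " ++ PySem.Int.toStr c ++ "× — review MUE limit."

def mueDefault : String := "MUE edits: all procedure units within CMS MUE limits."

-- p["code"]: first-match lookup; the .getD "" default is unreachable under Pre_ (key present)
def codeOf (p : List (String × String)) : String :=
  ((PySem.Dict.mk p).get? "code").getD ""

-- ===== PORT A =====
def mue_checks_py (procedures : List (List (String × String))) : List String :=
  let counts := procedures.foldl
    (fun d p => d.insert (codeOf p) (d.getD (codeOf p) 0 + 1)) PySem.Dict.empty
  let msgs := counts.items.foldl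
    (fun ms kc => if kc.2 > 1 then ms ++ [mueMsg kc.1 kc.2] else ms) []
  if msgs.isEmpty then [mueDefault] else msgs

-- ===== PORT B =====
-- the inner recursion 'go' of Source B: head code, its total count, then recurse on the
-- list with every occurrence of the head stripped
def mueGo : List String → List String
  | [] => []
  | h :: t =>
    (if (1 + (t.count h : Int)) > 1 then [mueMsg h (1 + (t.count h : Int))] else [])
      ++ mueGo (t.filter (fun x => x ≠ h))
termination_by l => l.length
decreasing_by
  simp only [List.length_unattach]
  exact Nat.lt_succ_of_le (le_trans (List.length_filter_le _ _) (by simp))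

def mue_checks_py_alt (procedures : List (List (String × String))) : List String :=
  let msgs := mueGo (procedures.map codeOf)
  if msgs.isEmpty then [mueDefault] else msgs

-- ===== PRECONDITION & SPEC =====
-- Pre_ excludes exactly the inputs where some procedure dict lacks the "code" key, on which the Python A raises KeyError.
def Pre_mue_checks_py (procedures : List (List (String × String))) : Prop :=
  (procedures.all (fun p => p.any (fun kv => kv.1 == "code"))) = true
instance (procedures : List (List (String × String))) : Decidable (Pre_mue_checks_py procedures) := by unfold Pre_mue_checks_py; infer_instance
def pvWitness_mue_checks_py : (List (List (String × String))) :=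
  [[("code", "99213")], [("code", "99213"), ("units", "2")], [("code", "99214")]]

def Spec_mue_checks_py (procedures : List (List (String × String))) (out : List String) : Prop := out = mue_checks_py_alt procedures
instance (procedures : List (List (String × String))) (out : List String) : Decidable (Spec_mue_checks_py procedures out) := by unfold Spec_mue_checks_py; infer_instance

-- ===== CLAIM (what is proved, stated in full; the proofs are below) =====
def Claim_equal_mue_checks_py : Prop := ∀ (procedures : List (List (String × String))), Dom_mue_checks_py procedures → Pre_mue_checks_py procedures → Spec_mue_checks_py procedures (mue_checks_py procedures)

-- ===== LEMMAS AND PROOFS =====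

-- A's counts dict is Counter(codes)
lemma mue_counts_eq (procedures : List (List (String × String))) :
    procedures.foldl (fun d p => d.insert (codeOf p) (d.getD (codeOf p) 0 + 1)) PySem.Dict.empty
    = PySem.Dict.counter (procedures.map codeOf) := by
  rw [← PySem.Dict.foldl_insert_getD_add_one_eq_counter, List.foldl_map]

-- A's message loop over counter items is a filter-then-map over the unique codes
lemma mue_items_loop (codes : List String) (l : List String) (acc : List String) :
    (l.map (fun k => (k, (codes.count k : Int)))).foldl
      (fun ms kc => if kc.2 > 1 then ms ++ [mueMsg kc.1 kc.2] else ms) acc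
    = acc ++ (l.filter (fun code => codes.count code > 1)).map
        (fun code => mueMsg code (codes.count code)) := by
  induction l generalizing acc with
  | nil => simp
  | cons k l ih =>
    by_cases h : 1 < codes.count k
    · simp [h, ih, show (1:Int) < (codes.count k : Int) by exact_mod_cast h]
    · simp [h, ih, show ¬ (1:Int) < (codes.count k : Int) by exact_mod_cast h]

-- stripping a value commutes with ordered dedup
lemma ofList_filter_ne (h : String) (t : List String) :
    PySem.Set.ofList (t.filter (fun x => x ≠ h)) = (PySem.Set.ofList t).discard h := by
  induction t with
  | nil => rfl
  | cons a t ih =>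
    by_cases hah : a = h
    · subst hah
      rw [List.filter_cons, if_neg (by simp), ih, PySem.Set.ofList_cons]
      simp [PySem.Set.discard, List.filter_filter]
    · rw [List.filter_cons, if_pos (by simpa using hah), PySem.Set.ofList_cons, ih,
        PySem.Set.ofList_cons]
      show _ = PySem.Set.discard (a :: PySem.Set.discard (PySem.Set.ofList t) a) h
      simp only [PySem.Set.discard, List.filter_cons, beq_eq_false_iff_ne.mpr hah,
        Bool.not_false, List.filter_filter, if_true]
      exact congrArg (a :: ·) (List.filter_congr fun x _ => Bool.and_comm _ _)

-- B's recursion computes the filter-then-map over the unique codes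
lemma mueGo_spec_aux (n : Nat) : ∀ l : List String, l.length ≤ n →
    mueGo l = ((PySem.Set.ofList l).filter (fun c => l.count c > 1)).map
        (fun c => mueMsg c (l.count c)) := by
  induction n with
  | zero =>
    intro l hl
    rw [List.length_eq_zero_iff.mp (Nat.le_zero.mp hl)]
    simp [mueGo]
  | succ n ihn =>
    intro l hl
    cases l with
    | nil => simp [mueGo]
    | cons h t =>
    have ih := ihn (t.filter (fun x => x ≠ h))
      (le_trans (List.length_filter_le _ _) (by simpa using hl))
    rw [mueGo, ih, PySem.Set.ofList_cons, ← ofList_filter_ne]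
    have hmem : ∀ c ∈ PySem.Set.ofList (t.filter (fun x => x ≠ h)),
        c ≠ h ∧ c ∈ t := by
      intro c hc
      have := (PySem.Set.mem_ofList _ _).mp hc
      simp only [List.mem_filter, decide_eq_true_eq] at this
      exact ⟨this.2, this.1⟩
    have hcount : ∀ c, c ≠ h →
        (t.filter (fun x => x ≠ h)).count c = (h :: t).count c := by
      intro c hch
      rw [List.count_filter (by simp [hch]), List.count_cons,
        if_neg (by simp [Ne.symm hch]), Nat.add_zero]
    have hfilter :
        ((PySem.Set.ofList (t.filter (fun x => x ≠ h))).filter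
            (fun c => (t.filter (fun x => x ≠ h)).count c > 1))
        = ((PySem.Set.ofList (t.filter (fun x => x ≠ h))).filter
            (fun c => (h :: t).count c > 1)) := by
      refine List.filter_congr ?_
      intro c hc
      rw [hcount c (hmem c hc).1]
    rw [hfilter]
    have hmap :
        ∀ s : List String, (∀ c ∈ s, c ≠ h ∧ c ∈ t) →
        (s.map (fun c => mueMsg c ((t.filter (fun x => x ≠ h)).count c)))
        = (s.map (fun c => mueMsg c ((h :: t).count c))) := by
      intro s hs
      refine List.map_congr_left ?_
      intro c hc
      rw [hcount c (hs c hc).1]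
    rw [hmap _ (fun c hc => hmem c ((List.mem_filter.mp hc).1))]
    have hhead : ((h :: t).count h : Int) = 1 + (t.count h : Int) := by
      rw [List.count_cons_self]; push_cast; ring
    by_cases hc : (1 : Int) + (t.count h : Int) > 1
    · have hcnat : 1 < (h :: t).count h := by
        have : 0 < t.count h := by exact_mod_cast (by omega : (0:Int) < (t.count h : Int))
        rw [List.count_cons_self]; omega
      rw [if_pos hc, List.filter_cons, if_pos (by simpa using hcnat), List.map_cons, hhead]
      simp
    · have hcnat : ¬ 1 < (h :: t).count h := by
        have : (t.count h : Int) ≤ 0 := by omega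
        have : t.count h = 0 := by exact_mod_cast le_antisymm this (by positivity)
        rw [List.count_cons_self]; omega
      rw [if_neg hc, List.filter_cons, if_neg (by simpa using hcnat), List.nil_append]

lemma mueGo_spec (l : List String) :
    mueGo l = ((PySem.Set.ofList l).filter (fun c => l.count c > 1)).map
        (fun c => mueMsg c (l.count c)) :=
  mueGo_spec_aux l.length l le_rfl

-- ===== VERDICT (by name: the statement is the Claim_ definition above) =====
theorem mue_checks_py_spec : Claim_equal_mue_checks_py := by
  intro procedures _ _
  unfold Spec_mue_checks_py mue_checks_py mue_checks_py_alt
  simp only [mue_counts_eq, PySem.Dict.items_counter, mue_items_loop, mueGo_spec,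
    List.nil_append]
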